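-- pv_equiv track=rewrite | github.com/LingardR8/KeDaYaFootball | config.py | create_zones_for_specified_numbers
-- ===== SOURCE A (Python) =====
-- def create_zones_for_specified_numbers(numbers, num_zones):
--     """为指定号码创建区间划分"""
--     numbers = sorted(numbers)
--     zone_size = len(numbers) // num_zones
--     remainder = len(numbers) % num_zones
--     zones = {}
--
--     start = 0
--     for i in range(num_zones):
--         end = start + zone_size
--         if i < remainder:
--             end += 1
--         zones[f'zone{i+1}'] = numbers[start:end]
--         start = end
--
--     return zones
-- ===== SOURCE B (Python) =====
-- def create_zones_for_specified_numbers(numbers, num_zones):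
--     """为指定号码创建区间划分"""
--     ordered = sorted(numbers)
--     n = len(ordered)
--     zone_size = n // num_zones
--     remainder = n % num_zones
--     zones = {f'zone{i + 1}': [] for i in range(num_zones)}
--     big = remainder * (zone_size + 1)
--     for rank, value in enumerate(ordered):
--         if rank < big:
--             j = rank // (zone_size + 1)
--         else:
--             j = remainder + (rank - big) // zone_size
--         zones[f'zone{j + 1}'].append(value)
--     return zones
-- ===== Notes on version B (the rewrite author's own statement) =====
-- stated objective: alternative
-- what changed: Instead of slicing the sorted list zone by zone with a running start index, B pre-creates all zones empty and makes one pass over the sorted elements, bucketing each element by computing its zone directly from its rank (ranks below remainder*(zone_size+1) go to zone rank//(zone_size+1), the rest to remainder+(rank-big)//zone_size).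
-- outside the precondition, e.g. on create_zones_for_specified_numbers([1], -1): A returns {}, B raises KeyError; on create_zones_for_specified_numbers([1], 0): A raises ZeroDivisionError, B raises ZeroDivisionError
import Mathlib
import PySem

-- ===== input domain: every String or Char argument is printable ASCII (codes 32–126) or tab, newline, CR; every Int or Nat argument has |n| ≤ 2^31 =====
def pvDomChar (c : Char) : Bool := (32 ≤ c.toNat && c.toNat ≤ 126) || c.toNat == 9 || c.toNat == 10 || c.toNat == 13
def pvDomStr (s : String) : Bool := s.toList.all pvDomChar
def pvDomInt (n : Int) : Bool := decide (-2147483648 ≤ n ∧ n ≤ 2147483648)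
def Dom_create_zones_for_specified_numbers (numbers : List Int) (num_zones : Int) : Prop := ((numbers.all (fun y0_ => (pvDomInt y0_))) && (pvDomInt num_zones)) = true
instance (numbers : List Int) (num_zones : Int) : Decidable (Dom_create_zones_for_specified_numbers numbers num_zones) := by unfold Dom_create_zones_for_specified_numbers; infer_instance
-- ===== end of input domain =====

-- B replaces A's zone-by-zone slicing with a running start by one element-driven pass: all zones
-- are pre-created empty and every sorted element is appended to the zone computed from its rank
-- (objective: alternative; same asymptotic cost).

-- ===== PORT A =====
def create_zones_for_specified_numbers (numbers : List Int) (num_zones : Int) : List (String × List Int) :=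
  let ns := PySem.List.sorted numbers (fun x => x)
  let zone_size := PySem.Int.floordiv (ns.length : Int) num_zones
  let remainder := PySem.Int.mod (ns.length : Int) num_zones
  let res := (PySem.List.pyRange 0 num_zones 1).foldl
    (fun (st : PySem.Dict String (List Int) × Int) i =>
      let e0 := st.2 + zone_size
      let e := if i < remainder then e0 + 1 else e0
      (st.1.insert ("zone" ++ PySem.Int.toStr (i + 1)) (PySem.List.slice ns (some st.2) (some e)), e))
    (PySem.Dict.empty, 0)
  res.1.items

-- ===== PORT B =====
def create_zones_for_specified_numbers_alt (numbers : List Int) (num_zones : Int) : List (String × List Int) :=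
  let ordered := PySem.List.sorted numbers (fun x => x)
  let zone_size := PySem.Int.floordiv (ordered.length : Int) num_zones
  let remainder := PySem.Int.mod (ordered.length : Int) num_zones
  let zones0 : PySem.Dict String (List Int) :=
    (PySem.List.pyRange 0 num_zones 1).foldl
      (fun d i => d.insert ("zone" ++ PySem.Int.toStr (i + 1)) []) PySem.Dict.empty
  let big := remainder * (zone_size + 1)
  let zones := (PySem.List.enumerate ordered).foldl
    (fun d pv =>
      d.modify ("zone" ++ PySem.Int.toStr ((if pv.1 < big then PySem.Int.floordiv pv.1 (zone_size + 1)
          else remainder + PySem.Int.floordiv (pv.1 - big) zone_size) + 1)) [] (fun l => l ++ [pv.2]))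
    zones0
  zones.items

-- ===== PRECONDITION & SPEC =====
-- Pre_ excludes num_zones = 0, where Python A raises ZeroDivisionError, and num_zones < 0, a
-- nonsensical zone count outside the task's natural domain (A happens to return {} there).
def Pre_create_zones_for_specified_numbers (numbers : List Int) (num_zones : Int) : Prop := 1 ≤ num_zones
instance (numbers : List Int) (num_zones : Int) : Decidable (Pre_create_zones_for_specified_numbers numbers num_zones) := by unfold Pre_create_zones_for_specified_numbers; infer_instance
def pvWitness_create_zones_for_specified_numbers : List Int × Int := ([3, 1, 2], 2)
def Spec_create_zones_for_specified_numbers (numbers : List Int) (num_zones : Int) (out : List (String × List Int)) : Prop := out = create_zones_for_specified_numbers_alt numbers num_zones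
instance (numbers : List Int) (num_zones : Int) (out : List (String × List Int)) : Decidable (Spec_create_zones_for_specified_numbers numbers num_zones out) := by unfold Spec_create_zones_for_specified_numbers; infer_instance

-- ===== CLAIM (what is proved, stated in full; the proofs are below) =====
def Claim_equal_create_zones_for_specified_numbers : Prop := ∀ (numbers : List Int) (num_zones : Int), Dom_create_zones_for_specified_numbers numbers num_zones → Pre_create_zones_for_specified_numbers numbers num_zones → Spec_create_zones_for_specified_numbers numbers num_zones (create_zones_for_specified_numbers numbers num_zones)

-- ===== LEMMAS AND PROOFS =====

-- Abbreviations used throughout: the zone key, A's closed-form zone bounds, B's per-rank zone index.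
def pvKey (i : Int) : String := "zone" ++ PySem.Int.toStr (i + 1)
def pvS (zs r i : Int) : Int := i * zs + min i r
def pvJ (zs r p : Int) : Int :=
  if p < r * (zs + 1) then PySem.Int.floordiv p (zs + 1)
  else r + PySem.Int.floordiv (p - r * (zs + 1)) zs

lemma pv_digitChar_inj (a b : Nat) (ha : a < 10) (hb : b < 10)
    (h : Nat.digitChar a = Nat.digitChar b) : a = b := by
  interval_cases a <;> interval_cases b <;> simp_all [Nat.digitChar]

lemma pv_toDigits_ten_inj : ∀ m n : Nat, Nat.toDigits 10 m = Nat.toDigits 10 n → m = n := by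
  intro m
  induction m using Nat.strong_induction_on with
  | _ m ih =>
    intro n h
    rcases lt_or_ge m 10 with h1 | h1 <;> rcases lt_or_ge n 10 with h2 | h2
    · rw [Nat.toDigits_of_lt_base h1, Nat.toDigits_of_lt_base h2] at h
      simp at h
      exact pv_digitChar_inj m n h1 h2 h
    · rw [Nat.toDigits_of_lt_base h1, Nat.toDigits_of_base_le (by norm_num) h2] at h
      have hl := congrArg List.length h
      simp only [List.length_append, List.length_cons, List.length_nil] at hl
      have hp := @Nat.length_toDigits_pos 10 (n / 10)
      omega
    · rw [Nat.toDigits_of_lt_base h2, Nat.toDigits_of_base_le (by norm_num) h1] at h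
      have hl := congrArg List.length h
      simp only [List.length_append, List.length_cons, List.length_nil] at hl
      have hp := @Nat.length_toDigits_pos 10 (m / 10)
      omega
    · rw [Nat.toDigits_of_base_le (by norm_num) h1, Nat.toDigits_of_base_le (by norm_num) h2] at h
      have h' := List.append_inj' h (by simp)
      have e1 := ih (m / 10) (Nat.div_lt_self (by omega) (by norm_num)) (n / 10) h'.1
      have e2 := pv_digitChar_inj (m % 10) (n % 10) (Nat.mod_lt _ (by norm_num)) (Nat.mod_lt _ (by norm_num)) (by simpa using h'.2)
      omega

lemma pv_key_inj (i j : Int) (hi : 0 ≤ i) (hj : 0 ≤ j) (h : pvKey i = pvKey j) : i = j := by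
  have h' := congrArg String.toList h
  unfold pvKey at h'
  simp only [String.toList_append, List.append_cancel_left_eq, PySem.Int.toList_toStr] at h'
  simp only [PySem.Int.toChars, if_neg (by omega : ¬ i + 1 < 0), if_neg (by omega : ¬ j + 1 < 0)] at h'
  have := pv_toDigits_ten_inj _ _ h'
  omega

lemma pv_dict_eq_of_items {d : PySem.Dict String (List Int)} {l : List (String × List Int)}
    (h : d.items = l) : d = PySem.Dict.mk l := by
  cases d; cases h; rfl

-- A's loop computes, in dictionary form, the list of closed-form slices.
lemma pv_loop (ns : List Int) (zs r : Int) (hr : 0 ≤ r) (k : Nat) :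
    (PySem.List.pyRange 0 (k : Int) 1).foldl
      (fun (st : PySem.Dict String (List Int) × Int) i =>
        let e0 := st.2 + zs
        let e := if i < r then e0 + 1 else e0
        (st.1.insert ("zone" ++ PySem.Int.toStr (i + 1)) (PySem.List.slice ns (some st.2) (some e)), e))
      (PySem.Dict.empty, 0)
    = (PySem.Dict.mk ((PySem.List.pyRange 0 (k : Int) 1).map (fun i =>
        ("zone" ++ PySem.Int.toStr (i + 1),
         PySem.List.slice ns (some (i * zs + min i r)) (some ((i + 1) * zs + min (i + 1) r))))),
       (k : Int) * zs + min (k : Int) r) := by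
  induction k with
  | zero =>
    simp [PySem.List.pyRange_one_eq_nil (le_refl (0 : Int)), min_eq_left hr]
    rfl
  | succ k ih =>
    push_cast
    rw [PySem.List.pyRange_one_succ_right (by positivity), List.foldl_append, List.map_append, ih]
    simp only [List.foldl_cons, List.foldl_nil, List.map_cons, List.map_nil]
    have hnc : (PySem.Dict.mk ((PySem.List.pyRange 0 (k : Int) 1).map (fun i =>
        ("zone" ++ PySem.Int.toStr (i + 1),
         PySem.List.slice ns (some (i * zs + min i r)) (some ((i + 1) * zs + min (i + 1) r)))))).contains
        ("zone" ++ PySem.Int.toStr ((k : Int) + 1)) = false := by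
      rw [Bool.eq_false_iff]
      intro hc
      rw [PySem.Dict.contains_iff_mem_keys] at hc
      rw [PySem.Dict.keys_mk, List.map_map] at hc
      obtain ⟨i, hmem, heq⟩ := List.mem_map.mp hc
      rw [PySem.List.mem_pyRange_one] at hmem
      have := pv_key_inj i (k : Int) hmem.1 (by positivity) heq
      omega
    have hitems := PySem.Dict.items_insert_of_not_contains _
      (PySem.List.slice ns (some ((k : Int) * zs + min (k : Int) r))
        (some (if (k : Int) < r then (k : Int) * zs + min (k : Int) r + zs + 1 else (k : Int) * zs + min (k : Int) r + zs))) hnc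
    have harith : (if (k : Int) < r then (k : Int) * zs + min (k : Int) r + zs + 1
        else (k : Int) * zs + min (k : Int) r + zs) = ((k : Int) + 1) * zs + min ((k : Int) + 1) r := by
      rcases lt_or_ge (k : Int) r with h | h
      · rw [if_pos h, min_eq_left (le_of_lt h), min_eq_left (by omega)]; ring
      · rw [if_neg (not_lt.mpr h), min_eq_right h, min_eq_right (by omega)]; ring
    show Prod.mk _ _ = _
    rw [← harith]
    refine congrArg₂ Prod.mk ?_ rfl
    have hv := hitems
    generalize hx : (PySem.List.slice ns (some ((k : Int) * zs + min (k : Int) r))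
        (some (if (k : Int) < r then (k : Int) * zs + min (k : Int) r + zs + 1 else (k : Int) * zs + min (k : Int) r + zs))) = v at hv ⊢
    exact pv_dict_eq_of_items hv

-- B's initialisation loop builds the dictionary of empty zones.
lemma pv_nodup_range (k : Nat) : (PySem.List.pyRange 0 (k : Int) 1).Nodup := by
  induction k with
  | zero =>
    push_cast
    rw [PySem.List.pyRange_one_eq_nil le_rfl]
    exact List.nodup_nil
  | succ k ih =>
    push_cast
    rw [PySem.List.pyRange_one_succ_right (by positivity)]
    simp only [List.nodup_append, List.nodup_singleton, true_and]
    refine ⟨ih, ?_⟩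
    intro x hx b hb
    rw [PySem.List.mem_pyRange_one] at hx
    simp only [List.mem_singleton] at hb
    subst hb
    omega

lemma pv_init (k : Nat) :
    (PySem.List.pyRange 0 (k : Int) 1).foldl
      (fun (d : PySem.Dict String (List Int)) i => d.insert ("zone" ++ PySem.Int.toStr (i + 1)) [])
      PySem.Dict.empty
    = PySem.Dict.mk ((PySem.List.pyRange 0 (k : Int) 1).map (fun i =>
        ("zone" ++ PySem.Int.toStr (i + 1), ([] : List Int)))) := by
  induction k with
  | zero =>
    push_cast
    rw [PySem.List.pyRange_one_eq_nil le_rfl]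
    rfl
  | succ k ih =>
    push_cast
    rw [PySem.List.pyRange_one_succ_right (by positivity), List.foldl_append, List.map_append, ih]
    simp only [List.foldl_cons, List.foldl_nil, List.map_cons, List.map_nil]
    have hnc : (PySem.Dict.mk ((PySem.List.pyRange 0 (k : Int) 1).map (fun i =>
        ("zone" ++ PySem.Int.toStr (i + 1), ([] : List Int))))).contains
        ("zone" ++ PySem.Int.toStr ((k : Int) + 1)) = false := by
      rw [Bool.eq_false_iff]
      intro hc
      rw [PySem.Dict.contains_iff_mem_keys] at hc
      rw [PySem.Dict.keys_mk, List.map_map] at hc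
      obtain ⟨i, hmem, heq⟩ := List.mem_map.mp hc
      rw [PySem.List.mem_pyRange_one] at hmem
      have := pv_key_inj i (k : Int) hmem.1 (by positivity) heq
      omega
    exact pv_dict_eq_of_items (PySem.Dict.items_insert_of_not_contains _ _ hnc)

-- B's rank→zone formula lands in the zone whose closed-form bounds contain the rank.
lemma pv_bucket (z n p : Int) (hz : 0 < z) (hp : 0 ≤ p) (hpn : p < n) :
    0 ≤ pvJ (PySem.Int.floordiv n z) (PySem.Int.mod n z) p ∧
    pvJ (PySem.Int.floordiv n z) (PySem.Int.mod n z) p < z ∧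
    pvS (PySem.Int.floordiv n z) (PySem.Int.mod n z) (pvJ (PySem.Int.floordiv n z) (PySem.Int.mod n z) p) ≤ p ∧
    p < pvS (PySem.Int.floordiv n z) (PySem.Int.mod n z) (pvJ (PySem.Int.floordiv n z) (PySem.Int.mod n z) p + 1) := by
  have hn : 0 ≤ n := by omega
  set zs := PySem.Int.floordiv n z with hzs_def
  set r := PySem.Int.mod n z with hr_def
  have hzs_e : zs = n / z := PySem.Int.floordiv_eq_ediv_of_pos hz
  have hr_e : r = n % z := PySem.Int.mod_eq_emod_of_pos hz
  have hr0 : 0 ≤ r := by rw [hr_e]; exact Int.emod_nonneg n (by omega)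
  have hrz : r < z := by rw [hr_e]; exact Int.emod_lt_of_pos n hz
  have hnz : n = zs * z + r := by
    have := Int.ediv_add_emod n z
    rw [hzs_e, hr_e]; linarith [this]
  have hzs0 : 0 ≤ zs := by rw [hzs_e]; exact Int.ediv_nonneg hn (by omega)
  unfold pvJ pvS
  by_cases hb : p < r * (zs + 1)
  · rw [if_pos hb]
    set q := PySem.Int.floordiv p (zs + 1) with hq_def
    have hq_e : q = p / (zs + 1) := PySem.Int.floordiv_eq_ediv_of_pos (by omega)
    have hdm : (zs + 1) * q + p % (zs + 1) = p := by rw [hq_e]; exact Int.ediv_add_emod p (zs + 1)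
    have hm0 : 0 ≤ p % (zs + 1) := Int.emod_nonneg p (by omega)
    have hm1 : p % (zs + 1) < zs + 1 := Int.emod_lt_of_pos p (by omega)
    have hq0 : 0 ≤ q := by rw [hq_e]; exact Int.ediv_nonneg hp (by omega)
    have hqr : q < r := by
      by_contra hqr
      push_neg at hqr
      have h1 : r * (zs + 1) ≤ q * (zs + 1) := mul_le_mul_of_nonneg_right hqr (by omega)
      nlinarith
    refine ⟨hq0, by omega, ?_, ?_⟩
    · rw [min_eq_left (le_of_lt hqr)]; nlinarith
    · rw [min_eq_left (by omega : q + 1 ≤ r)]; nlinarith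
  · rw [if_neg hb]
    push_neg at hb
    have hzs1 : 1 ≤ zs := by
      by_contra hc
      push_neg at hc
      have hz0 : zs = 0 := by omega
      rw [hz0] at hnz hb
      have : r * (0 + 1) = r := by ring
      omega
    set q := PySem.Int.floordiv (p - r * (zs + 1)) zs with hq_def
    have hq_e : q = (p - r * (zs + 1)) / zs := PySem.Int.floordiv_eq_ediv_of_pos (by omega)
    have hdm : zs * q + (p - r * (zs + 1)) % zs = p - r * (zs + 1) := by
      rw [hq_e]; exact Int.ediv_add_emod _ zs
    have hm0 : 0 ≤ (p - r * (zs + 1)) % zs := Int.emod_nonneg _ (by omega)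
    have hm1 : (p - r * (zs + 1)) % zs < zs := Int.emod_lt_of_pos _ (by omega)
    have hq0 : 0 ≤ q := by rw [hq_e]; exact Int.ediv_nonneg (by omega) (by omega)
    have hqz : q < z - r := by
      have h1 : zs * q < zs * (z - r) := by nlinarith
      exact lt_of_mul_lt_mul_left h1 hzs0
    refine ⟨by omega, by omega, ?_, ?_⟩
    · rw [min_eq_right (by omega : r ≤ r + q)]; nlinarith
    · rw [min_eq_right (by omega : r ≤ r + q + 1)]; nlinarith

-- The zones' closed-form intervals are pairwise disjoint.
lemma pv_disjoint (zs r i i' p : Int) (hzs : 0 ≤ zs) (hr : 0 ≤ r)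
    (h1 : pvS zs r i ≤ p) (h2 : p < pvS zs r (i + 1))
    (h1' : pvS zs r i' ≤ p) (h2' : p < pvS zs r (i' + 1)) : i = i' := by
  have mono : ∀ a b : Int, a ≤ b → pvS zs r a ≤ pvS zs r b := by
    intro a b hab
    unfold pvS
    have h3 : 0 ≤ (b - a) * zs := mul_nonneg (by omega) hzs
    have h4 : min a r ≤ min b r := min_le_min_right r hab
    nlinarith
  by_contra hne
  rcases lt_or_gt_of_ne hne with hlt | hgt
  · have := mono (i + 1) i' (by omega); omega
  · have := mono (i' + 1) i (by omega); omega

-- Filtering an enumeration by a rank interval yields the corresponding drop/take segment.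
lemma pv_enum_filter (ns : List Int) : ∀ (s0 a b : Int),
    ((PySem.List.enumerate ns s0).filter (fun pv => decide (a ≤ pv.1 ∧ pv.1 < b))).map Prod.snd
    = (ns.drop (a - s0).toNat).take ((b - max a s0).toNat) := by
  induction ns with
  | nil => intro s0 a b; simp [PySem.List.enumerate_nil]
  | cons x xs ih =>
    intro s0 a b
    rw [PySem.List.enumerate_cons, List.filter_cons]
    by_cases h1 : a ≤ s0 ∧ s0 < b
    · rw [if_pos (by simpa using h1)]
      simp only [List.map_cons]
      rw [ih (s0 + 1)]
      have h2 : (a - s0).toNat = 0 := by omega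
      have h3 : (a - (s0 + 1)).toNat = 0 := by omega
      have h4 : max a s0 = s0 := max_eq_right h1.1
      have h5 : max a (s0 + 1) = s0 + 1 := max_eq_right (by omega)
      have h6 : (b - s0).toNat = (b - (s0 + 1)).toNat + 1 := by omega
      rw [h2, h3, h4, h5, h6]
      simp
    · rw [if_neg (by simpa using h1)]
      rw [ih (s0 + 1)]
      rcases lt_or_ge s0 a with hc | hc
      · have h2 : (a - s0).toNat = (a - (s0 + 1)).toNat + 1 := by omega
        have h4 : max a s0 = a := max_eq_left (by omega)
        have h5 : max a (s0 + 1) = max a (s0 + 1) := rfl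
        by_cases hd : s0 + 1 ≤ a
        · rw [h2, h4, max_eq_left hd, List.drop_succ_cons]
        · have ha : a = s0 + 1 := by omega
          rw [h2, h4, ha]
          simp
      · have hb : b ≤ s0 := by omega
        have h2 : (a - s0).toNat = 0 := by omega
        have h3 : (a - (s0 + 1)).toNat = 0 := by omega
        have h4 : (b - max a s0).toNat = 0 := by
          have := le_max_right a s0; omega
        have h5 : (b - max a (s0 + 1)).toNat = 0 := by
          have := le_max_right a (s0 + 1); omega
        rw [h2, h3, h4, h5]
        simp

-- Two dictionaries with the same duplicate-free keys and the same getD values have the same items.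
lemma pv_items_ext {d d' : PySem.Dict String (List Int)}
    (hk : d.keys = d'.keys) (hnd : d.keys.Nodup)
    (hv : ∀ k, k ∈ d.keys → d.getD k [] = d'.getD k []) : d.items = d'.items := by
  have hk1 : d.items.map Prod.fst = d'.items.map Prod.fst := hk
  have hnd' : d'.keys.Nodup := hk ▸ hnd
  apply List.ext_getElem
  · have := congrArg List.length hk1
    simpa using this
  · intro i hi hi'
    have hfst : (d.items[i]).1 = (d'.items[i]).1 := by
      have := congrArg (fun l => l[i]?) hk1
      simp only [List.getElem?_map] at this
      rw [List.getElem?_eq_getElem hi, List.getElem?_eq_getElem hi'] at this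
      simpa using this
    have m1 : d.items[i] ∈ d.items := List.getElem_mem hi
    have m2 : d'.items[i] ∈ d'.items := List.getElem_mem hi'
    have e1 : d.getD (d.items[i]).1 [] = (d.items[i]).2 :=
      PySem.Dict.getD_of_mem_items d (by simpa using m1) hnd []
    have e2 : d'.getD (d'.items[i]).1 [] = (d'.items[i]).2 :=
      PySem.Dict.getD_of_mem_items d' (by simpa using m2) hnd' []
    have hkmem : (d.items[i]).1 ∈ d.keys := by
      unfold PySem.Dict.keys
      exact List.mem_map_of_mem m1
    have := hv _ hkmem
    rw [e1, hfst, e2] at this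
    exact Prod.ext hfst this

lemma pv_mono (zs r a b : Int) (hzs : 0 ≤ zs) (hab : a ≤ b) : pvS zs r a ≤ pvS zs r b := by
  unfold pvS
  have h3 : 0 ≤ (b - a) * zs := mul_nonneg (by omega) hzs
  have h4 : min a r ≤ min b r := min_le_min_right r hab
  nlinarith

-- B's whole pass over the enumerated elements produces exactly A's closed-form zone slices.
lemma pv_zones (ns : List Int) (k : Nat) (hk : 0 < k) :
    ((PySem.List.enumerate ns 0).foldl
      (fun (d : PySem.Dict String (List Int)) (pv : Int × Int) =>
        d.modify (pvKey (pvJ (PySem.Int.floordiv (ns.length : Int) (k : Int))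
                             (PySem.Int.mod (ns.length : Int) (k : Int)) pv.1)) []
          (fun l => l ++ [pv.2]))
      (PySem.Dict.mk ((PySem.List.pyRange 0 (k : Int) 1).map (fun i => (pvKey i, ([] : List Int)))))).items
    = (PySem.List.pyRange 0 (k : Int) 1).map (fun i =>
        (pvKey i, PySem.List.slice ns
          (some (pvS (PySem.Int.floordiv (ns.length : Int) (k : Int)) (PySem.Int.mod (ns.length : Int) (k : Int)) i))
          (some (pvS (PySem.Int.floordiv (ns.length : Int) (k : Int)) (PySem.Int.mod (ns.length : Int) (k : Int)) (i + 1))))) := by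
  set zs := PySem.Int.floordiv (ns.length : Int) (k : Int) with hzs
  set r := PySem.Int.mod (ns.length : Int) (k : Int) with hrr
  set R := PySem.List.pyRange 0 (k : Int) 1 with hR
  set L0 := R.map (fun i => (pvKey i, ([] : List Int))) with hL0
  set LA := R.map (fun i =>
      (pvKey i, PySem.List.slice ns (some (pvS zs r i)) (some (pvS zs r (i + 1))))) with hLA
  set F := (PySem.List.enumerate ns 0).foldl
      (fun (d : PySem.Dict String (List Int)) (pv : Int × Int) =>
        d.modify (pvKey (pvJ zs r pv.1)) [] (fun l => l ++ [pv.2]))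
      (PySem.Dict.mk L0) with hF
  have hzpos : (0 : Int) < (k : Int) := by exact_mod_cast hk
  have hr0 : 0 ≤ r := by
    rw [hrr, PySem.Int.mod_eq_emod_of_pos hzpos]
    exact Int.emod_nonneg _ (by omega)
  have hzs0 : 0 ≤ zs := by
    rw [hzs, PySem.Int.floordiv_eq_ediv_of_pos hzpos]
    exact Int.ediv_nonneg (by positivity) (by omega)
  have hbucket : ∀ p : Int, 0 ≤ p → p < (ns.length : Int) →
      0 ≤ pvJ zs r p ∧ pvJ zs r p < (k : Int) ∧ pvS zs r (pvJ zs r p) ≤ p ∧ p < pvS zs r (pvJ zs r p + 1) := by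
    intro p hp hpn
    have h := pv_bucket (k : Int) (ns.length : Int) p hzpos hp hpn
    rw [← hzs, ← hrr] at h
    exact h
  have hL0keys : (PySem.Dict.mk L0).keys = R.map (fun i => pvKey i) := by
    rw [hL0, PySem.Dict.keys_mk, List.map_map]
    rfl
  have hLAkeys : (PySem.Dict.mk LA).keys = R.map (fun i => pvKey i) := by
    rw [hLA, PySem.Dict.keys_mk, List.map_map]
    rfl
  have hnodup : (R.map (fun i => pvKey i)).Nodup := by
    refine List.Nodup.map_on ?_ (pv_nodup_range k)
    intro x hx y hy hxy
    rw [hR, PySem.List.mem_pyRange_one] at hx hy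
    exact pv_key_inj x y hx.1 hy.1 hxy
  have hFkeys : F.keys = R.map (fun i => pvKey i) := by
    have h := PySem.Dict.keys_foldl_modify_key (PySem.List.enumerate ns 0)
      (fun pv : Int × Int => pvKey (pvJ zs r pv.1)) ([] : List Int)
      (fun _ pv => fun l => l ++ [pv.2]) (PySem.Dict.mk L0)
    rw [PySem.Set.update_eq_append_filter] at h
    have hfilt : (PySem.Set.ofList ((PySem.List.enumerate ns 0).map
        (fun pv : Int × Int => pvKey (pvJ zs r pv.1)))).filter
        (fun y => !(PySem.Set.contains ((PySem.Dict.mk L0).keys) y)) = [] := by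
      rw [List.filter_eq_nil_iff]
      intro y hy
      rw [PySem.Set.mem_ofList] at hy
      obtain ⟨pv, hpv, rfl⟩ := List.mem_map.mp hy
      obtain ⟨kk, hkk, rfl⟩ := (PySem.List.mem_enumerate_iff ns 0 pv).mp hpv
      have hp0 : (0 : Int) ≤ 0 + (kk : Int) := by positivity
      have hpn : 0 + (kk : Int) < (ns.length : Int) := by push_cast; omega
      obtain ⟨hj0, hjk, -, -⟩ := hbucket _ hp0 hpn
      have hc : PySem.Set.contains ((PySem.Dict.mk L0).keys) (pvKey (pvJ zs r (0 + (kk : Int)))) = true := by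
        rw [PySem.Set.contains_iff, hL0keys]
        exact List.mem_map_of_mem (by rw [hR, PySem.List.mem_pyRange_one]; exact ⟨hj0, hjk⟩)
      intro hbad
      rw [hc] at hbad
      simp at hbad
    rw [hfilt, List.append_nil] at h
    rw [← hL0keys]
    exact h
  have hvals : ∀ key, key ∈ F.keys → F.getD key [] = (PySem.Dict.mk LA).getD key [] := by
    intro key hkey
    rw [hFkeys] at hkey
    obtain ⟨i, hiR, rfl⟩ := List.mem_map.mp hkey
    have hi : 0 ≤ i ∧ i < (k : Int) := by rwa [hR, PySem.List.mem_pyRange_one] at hiR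
    have hs0 : 0 ≤ pvS zs r i := by
      have h1 : 0 ≤ i * zs := mul_nonneg hi.1 hzs0
      have h2 : 0 ≤ min i r := le_min hi.1 hr0
      unfold pvS
      omega
    have hs1 : pvS zs r i ≤ pvS zs r (i + 1) := pv_mono zs r i (i + 1) hzs0 (by omega)
    have hgF : F.getD (pvKey i) [] = (PySem.Dict.mk L0).getD (pvKey i) [] ++
        (((PySem.List.enumerate ns 0).filter
          (fun pv : Int × Int => pvKey (pvJ zs r pv.1) == pvKey i)).map (fun pv => pv.2)) := by
      have h := PySem.Dict.getD_foldl_modify_append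
        ((PySem.List.enumerate ns 0).map (fun pv : Int × Int => (pvKey (pvJ zs r pv.1), pv.2)))
        (PySem.Dict.mk L0) (pvKey i)
      rw [List.foldl_map, List.filter_map, List.map_map] at h
      exact h
    have hmk0 : (PySem.Dict.mk L0).getD (pvKey i) [] = [] := by
      refine PySem.Dict.getD_of_mem_items _ ?_ ?_ []
      · exact List.mem_map_of_mem hiR
      · rw [hL0keys]; exact hnodup
    have hfc : ((PySem.List.enumerate ns 0).filter
          (fun pv : Int × Int => pvKey (pvJ zs r pv.1) == pvKey i))
        = (PySem.List.enumerate ns 0).filter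
          (fun pv : Int × Int => decide (pvS zs r i ≤ pv.1 ∧ pv.1 < pvS zs r (i + 1))) := by
      apply List.filter_congr
      intro pv hpv
      obtain ⟨kk, hkk, rfl⟩ := (PySem.List.mem_enumerate_iff ns 0 pv).mp hpv
      have hp0 : (0 : Int) ≤ 0 + (kk : Int) := by positivity
      have hpn : 0 + (kk : Int) < (ns.length : Int) := by push_cast; omega
      obtain ⟨hj0, hjk, hjs, hje⟩ := hbucket _ hp0 hpn
      by_cases hcond : pvS zs r i ≤ 0 + (kk : Int) ∧ 0 + (kk : Int) < pvS zs r (i + 1)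
      · have hij : pvJ zs r (0 + (kk : Int)) = i :=
          pv_disjoint zs r _ i _ hzs0 hr0 hjs hje hcond.1 hcond.2
        rw [hij]
        simp only [beq_self_eq_true]
        exact (decide_eq_true hcond).symm
      · have hne : ¬ pvKey (pvJ zs r (0 + (kk : Int))) = pvKey i := by
          intro he
          have hij := pv_key_inj _ _ hj0 hi.1 he
          rw [hij] at hjs hje
          exact hcond ⟨hjs, hje⟩
        have hfalse : (pvKey (pvJ zs r (0 + (kk : Int))) == pvKey i) = false := by
          simp only [beq_eq_false_iff_ne, ne_eq]
          exact hne
        rw [hfalse]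
        exact (decide_eq_false hcond).symm
    have hseg := pv_enum_filter ns 0 (pvS zs r i) (pvS zs r (i + 1))
    rw [sub_zero, max_eq_left hs0] at hseg
    have hmkA : (PySem.Dict.mk LA).getD (pvKey i) []
        = PySem.List.slice ns (some (pvS zs r i)) (some (pvS zs r (i + 1))) := by
      refine PySem.Dict.getD_of_mem_items _ ?_ ?_ []
      · exact List.mem_map_of_mem hiR
      · rw [hLAkeys]; exact hnodup
    rw [hgF, hmk0, hmkA, List.nil_append, hfc, hseg,
        PySem.List.slice_toNat ns hs0 (le_trans hs0 hs1)]
    have : (pvS zs r (i + 1) - pvS zs r i).toNat = (pvS zs r (i + 1)).toNat - (pvS zs r i).toNat := by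
      omega
    rw [this]
  have hgoal : F.items = (PySem.Dict.mk LA).items :=
    pv_items_ext (by rw [hFkeys, hLAkeys]) (by rw [hFkeys]; exact hnodup) hvals
  exact hgoal

theorem pv_main (numbers : List Int) (num_zones : Int)
    (hPre : 1 ≤ num_zones) :
    create_zones_for_specified_numbers numbers num_zones
      = create_zones_for_specified_numbers_alt numbers num_zones := by
  obtain ⟨k, hk⟩ : ∃ k : Nat, (k : Int) = num_zones :=
    ⟨num_zones.toNat, Int.toNat_of_nonneg (by omega)⟩
  subst hk
  have hkpos : 0 < k := by exact_mod_cast hPre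
  set ns := PySem.List.sorted numbers (fun x => x) with hns
  set zs := PySem.Int.floordiv (ns.length : Int) (k : Int) with hzs
  set r := PySem.Int.mod (ns.length : Int) (k : Int) with hrr
  have hzpos : (0 : Int) < (k : Int) := by exact_mod_cast hkpos
  have hr0 : 0 ≤ r := by
    rw [hrr, PySem.Int.mod_eq_emod_of_pos hzpos]
    exact Int.emod_nonneg _ (by omega)
  have h1 := congrArg (fun p : PySem.Dict String (List Int) × Int => p.1.items)
    (pv_loop ns zs r hr0 k)
  have h2 := pv_zones ns k hkpos
  have h3 := congrArg (fun d : PySem.Dict String (List Int) =>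
      (List.foldl (fun (d : PySem.Dict String (List Int)) (pv : Int × Int) =>
        d.modify (pvKey (pvJ zs r pv.1)) [] (fun l => l ++ [pv.2])) d
        (PySem.List.enumerate ns 0)).items)
    (pv_init k)
  exact h1.trans ((h3.trans h2).symm)

-- ===== VERDICT (by name: the statement is the Claim_ definition above) =====
theorem create_zones_for_specified_numbers_spec : Claim_equal_create_zones_for_specified_numbers := by
  intro numbers num_zones _ hPre
  exact pv_main numbers num_zones hPre
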